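-- pv_equiv track=rewrite | github.com/nnkfrnds/l-system | ex5.py | gerar_alfabeto_da_pilha
-- ===== SOURCE A (Python) =====
-- def gerar_alfabeto_da_pilha(n, alfabeto):
--   #o alfabeto da  pilha vai ter so as variaveis
--   variaveis = {
--       simbolo: tipo for simbolo, tipo in alfabeto.items()
--       if tipo == 'variavel'
--   }
--
--   alfabeto_da_pilha = set()
--
--   for nivel in range(n):
--     nivel_atual = nivel + 1
--     for simbolo in variaveis:
--       alfabeto_da_pilha.add((simbolo, nivel_atual))
--
--   return sorted(list(alfabeto_da_pilha))
-- ===== SOURCE B (Python) =====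
-- def gerar_alfabeto_da_pilha(n, alfabeto):
--     # selection by repeated minimum extraction: no sort call anywhere.
--     # pull the smallest remaining variable symbol out of the set and append
--     # its whole level block (s,1)..(s,n); repeat until the set is empty.
--     restantes = {s for s, t in alfabeto.items() if t == 'variavel'}
--     saida = []
--     while restantes:
--         s = min(restantes)
--         restantes.remove(s)
--         for nivel in range(1, n + 1):
--             saida.append((s, nivel))
--     return saida
-- ===== Notes on version B (the rewrite author's own statement) =====
-- stated objective: alternative
-- what changed: A fills a set with all n*v (symbol, level) pairs and then library-sorts the n*v pairs; B never calls sort at all: it repeatedly extracts the minimum remaining variable symbol from the set (selection) and appends that symbol's whole level block (s,1)..(s,n) directly to the output.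
import Mathlib
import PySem

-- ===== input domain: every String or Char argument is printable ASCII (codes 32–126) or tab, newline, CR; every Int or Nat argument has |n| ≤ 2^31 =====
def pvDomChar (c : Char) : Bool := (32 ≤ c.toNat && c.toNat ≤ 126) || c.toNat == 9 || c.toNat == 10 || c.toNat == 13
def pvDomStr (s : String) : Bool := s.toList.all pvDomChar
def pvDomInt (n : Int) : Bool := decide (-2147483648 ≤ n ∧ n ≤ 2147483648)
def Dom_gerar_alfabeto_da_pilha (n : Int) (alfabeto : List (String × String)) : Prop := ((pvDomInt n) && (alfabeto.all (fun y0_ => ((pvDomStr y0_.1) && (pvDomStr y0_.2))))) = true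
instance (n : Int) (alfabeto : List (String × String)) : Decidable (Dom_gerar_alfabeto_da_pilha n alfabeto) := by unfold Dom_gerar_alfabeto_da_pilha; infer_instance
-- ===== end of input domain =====

-- B replaces A's "build the set of all n·v pairs, then sort them" by a sort-free selection
-- loop: repeatedly extract the minimum remaining variable symbol and append its level block
-- (objective: alternative).

-- ===== PORT A =====
def gerar_alfabeto_da_pilha (n : Int) (alfabeto : List (String × String)) : List (String × Int) :=
  -- variaveis = {simbolo: tipo for simbolo, tipo in alfabeto.items() if tipo == 'variavel'}
  let variaveis : PySem.Dict String String :=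
    (alfabeto.filter (fun p => p.2 == "variavel")).foldl
      (fun d p => d.insert p.1 p.2) PySem.Dict.empty
  -- alfabeto_da_pilha = set(); for nivel in range(n): for simbolo in variaveis: add (simbolo, nivel_atual)
  let alfabeto_da_pilha : PySem.Set (String × Int) :=
    (PySem.List.pyRange 0 n 1).foldl (fun st nivel =>
      let nivel_atual := nivel + 1
      variaveis.keys.foldl (fun st simbolo => PySem.Set.add st (simbolo, nivel_atual)) st)
      (PySem.Set.ofList [])
  -- return sorted(list(alfabeto_da_pilha))   (tuples compare lexicographically)
  PySem.List.sorted2 alfabeto_da_pilha (fun p => p.1) (fun p => p.2)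

-- ===== PORT B =====
-- the while loop of Source B: while restantes: s = min(restantes); restantes.remove(s);
--   for nivel in range(1, n+1): saida.append((s, nivel))
def pvLoopB (n : Int) (restantes : PySem.Set String) : List (String × Int) :=
  match hm : PySem.List.min? restantes (fun s => s) with
  | none => []   -- restantes is empty: the while loop stops
  | some s =>
    match hr : PySem.Set.remove? restantes s with
    | none => []   -- unreachable: min is a member, set removal cannot raise
    | some rest =>
      ((PySem.List.pyRange 1 (n + 1) 1).map (fun nivel => (s, nivel))) ++ pvLoopB n rest
termination_by restantes.length
decreasing_by
  have hmem : s ∈ restantes := PySem.List.min?_mem hm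
  have h3 : PySem.Set.discard restantes s = rest :=
    Option.some_injective _ ((PySem.Set.remove?_of_mem hmem).symm.trans hr)
  have h4 : rest.length < restantes.length := by
    rw [← h3]
    simp only [PySem.Set.discard]
    exact List.length_filter_lt_length_iff_exists.mpr ⟨s, hmem, by simp⟩
  exact h4

def gerar_alfabeto_da_pilha_alt (n : Int) (alfabeto : List (String × String)) : List (String × Int) :=
  -- restantes = {s for s, t in alfabeto.items() if t == 'variavel'}
  let restantes : PySem.Set String :=
    PySem.Set.ofList ((alfabeto.filter (fun p => p.2 == "variavel")).map (fun p => p.1))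
  pvLoopB n restantes

-- ===== PRECONDITION & SPEC =====
def Spec_gerar_alfabeto_da_pilha (n : Int) (alfabeto : List (String × String)) (out : List (String × Int)) : Prop := out = gerar_alfabeto_da_pilha_alt n alfabeto
instance (n : Int) (alfabeto : List (String × String)) (out : List (String × Int)) : Decidable (Spec_gerar_alfabeto_da_pilha n alfabeto out) := by unfold Spec_gerar_alfabeto_da_pilha; infer_instance

-- ===== CLAIM (what is proved, stated in full; the proofs are below) =====
def Claim_equal_gerar_alfabeto_da_pilha : Prop := ∀ (n : Int) (alfabeto : List (String × String)), Dom_gerar_alfabeto_da_pilha n alfabeto → Spec_gerar_alfabeto_da_pilha n alfabeto (gerar_alfabeto_da_pilha n alfabeto)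

-- ===== LEMMAS AND PROOFS =====

-- A's nested loop, started at level a on a state whose levels are all ≤ a, appends the
-- (all fresh) pairs (symbol, level+1), level block by level block.
theorem pv_loopA (ks : List String) (hk : ks.Nodup) :
    ∀ (a b : Int) (st : List (String × Int)), (∀ p ∈ st, p.2 ≤ a) →
      (PySem.List.pyRange a b 1).foldl
          (fun st nivel => ks.foldl (fun st simbolo => PySem.Set.add st (simbolo, nivel + 1)) st) st
        = st ++ (PySem.List.pyRange a b 1).flatMap (fun nivel => ks.map (fun s => (s, nivel + 1))) := by
  intro a b st hst
  induction h : (b - a).toNat generalizing a st with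
  | zero =>
    rw [PySem.List.pyRange_one_eq_nil (by omega)]
    simp
  | succ k ih =>
    have hab : a < b := by omega
    rw [PySem.List.pyRange_one_cons hab]
    simp only [List.foldl_cons, List.flatMap_cons]
    rw [← PySem.Set.update_map_eq_foldl_add ks (fun s => (s, a + 1)) st]
    rw [PySem.Set.update_eq_append_of_disjoint st (List.map (fun s => (s, a + 1)) ks)
      (hk.map (fun x y hxy => by simpa using hxy))
      (by
        intro x hx hmem
        obtain ⟨s, _, rfl⟩ := List.mem_map.mp hx
        have := hst _ hmem
        simp at this)]
    rw [ih (a + 1) (st ++ ks.map (fun s => (s, a + 1)))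
      (by
        intro p hp
        rcases List.mem_append.mp hp with h1 | h1
        · have := hst _ h1; omega
        · obtain ⟨s, _, rfl⟩ := List.mem_map.mp h1; omega)
      (by omega)]
    simp [List.append_assoc]

-- CPython's tuple comparison, as sorted2 runs it, is the lexicographic order on String × Int.
theorem pv_lex_before (p q : String × Int) :
    (decide (p.1 < q.1) || (!decide (q.1 < p.1) && decide (p.2 < q.2)))
      = decide (toLex p < toLex q) := by
  rcases lt_trichotomy p.1 q.1 with h | h | h
  · simp [Prod.Lex.lt_iff, h, lt_asymm h]
  · simp [Prod.Lex.lt_iff, h]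
  · simp [Prod.Lex.lt_iff, h, lt_asymm h, (ne_of_gt h)]

theorem pv_sorted2_eq_sorted_lex (xs : List (String × Int)) :
    PySem.List.sorted2 xs (fun p => p.1) (fun p => p.2) =
      PySem.List.sorted xs (fun p => toLex p) := by
  rw [PySem.List.sorted_eq_foldl_insertBy]
  simp only [PySem.List.sorted2]
  congr 1
  funext acc x
  congr 1
  funext a b
  exact pv_lex_before a b

-- Sorting the level-major pair list lexicographically = symbol-major emission over the
-- sorted symbols: the two sides are Nodup permutations of each other and the right side
-- is strictly increasing in the lexicographic order.
theorem pv_main (n : Int) (vs : List String) (hnd : vs.Nodup)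
    (hpl : (PySem.List.sorted vs (fun s => s)).Pairwise (· < ·)) :
    PySem.List.sorted
        ((PySem.List.pyRange 0 n 1).flatMap (fun nivel => vs.map (fun s => (s, nivel + 1))))
        (fun p => toLex p)
      = (PySem.List.sorted vs (fun s => s)).flatMap
          (fun s => (PySem.List.pyRange 1 (n + 1) 1).map (fun nivel => (s, nivel))) := by
  apply PySem.List.sorted_eq_of_perm_of_pairwise_lt
  · -- permutation
    have nodupP : ((PySem.List.pyRange 0 n 1).flatMap
        (fun nivel => vs.map (fun s => (s, nivel + 1)))).Nodup := by
      rw [List.flatMap_def, List.nodup_flatten]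
      constructor
      · intro l hl
        obtain ⟨nivel, _, rfl⟩ := List.mem_map.mp hl
        exact hnd.map (fun x y hxy => by simpa using hxy)
      · rw [List.pairwise_map]
        refine (PySem.List.pairwise_lt_pyRange_one 0 n).imp ?_
        intro x y hxy p hp hq
        obtain ⟨s, _, rfl⟩ := List.mem_map.mp hp
        obtain ⟨t, _, h2⟩ := List.mem_map.mp hq
        have : (x + 1 : Int) = y + 1 := by
          have := congrArg Prod.snd h2; simpa using this.symm
        omega
    have nodupQ : ((PySem.List.sorted vs (fun s => s)).flatMap
        (fun s => (PySem.List.pyRange 1 (n + 1) 1).map (fun nivel => (s, nivel)))).Nodup := by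
      rw [List.flatMap_def, List.nodup_flatten]
      constructor
      · intro l hl
        obtain ⟨s, _, rfl⟩ := List.mem_map.mp hl
        exact (PySem.List.nodup_pyRange_one 1 (n + 1)).map (fun x y hxy => by simpa using hxy)
      · rw [List.pairwise_map]
        refine hpl.imp ?_
        intro x y hxy p hp hq
        obtain ⟨a, _, rfl⟩ := List.mem_map.mp hp
        obtain ⟨b, _, h2⟩ := List.mem_map.mp hq
        have : x = y := by
          have := congrArg Prod.fst h2; simpa using this.symm
        exact absurd this (ne_of_lt hxy)
    rw [List.perm_ext_iff_of_nodup nodupQ nodupP]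
    intro x
    simp only [List.mem_flatMap, List.mem_map, PySem.List.mem_sorted,
      PySem.List.mem_pyRange_one]
    constructor
    · rintro ⟨s, hs, nivel, ⟨h1, h2⟩, rfl⟩
      exact ⟨nivel - 1, ⟨by omega, by omega⟩, s, hs, by simp⟩
    · rintro ⟨nivel, ⟨h1, h2⟩, s, hs, rfl⟩
      exact ⟨s, hs, nivel + 1, ⟨by omega, by omega⟩, rfl⟩
  · -- strictly increasing in the lexicographic order
    rw [List.flatMap_def, List.pairwise_flatten]
    constructor
    · intro l hl
      obtain ⟨s, _, rfl⟩ := List.mem_map.mp hl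
      rw [List.pairwise_map]
      refine (PySem.List.pairwise_lt_pyRange_one 1 (n + 1)).imp ?_
      intro x y hxy
      simp [Prod.Lex.lt_iff, hxy]
    · rw [List.pairwise_map]
      refine hpl.imp ?_
      intro x y hxy p hp q hq
      obtain ⟨a, _, rfl⟩ := List.mem_map.mp hp
      obtain ⟨b, _, rfl⟩ := List.mem_map.mp hq
      simp [Prod.Lex.lt_iff, hxy]

-- Extracting the minimum splits sorted(vs) at the head (Nodup vs).
theorem pv_sorted_cons_min (vs : List String) (hnd : vs.Nodup) (m : String)
    (hm : PySem.List.min? vs (fun s => s) = some m) :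
    PySem.List.sorted vs (fun s => s)
      = m :: PySem.List.sorted (vs.filter (fun y => !(y == m))) (fun s => s) := by
  have hmem : m ∈ vs := PySem.List.min?_mem hm
  have hmin : ∀ y ∈ vs, m ≤ y := PySem.List.min?_isMin hm
  have hfe : vs.filter (fun y => !(y == m)) = vs.erase m := by
    rw [hnd.erase_eq_filter]
    congr 1
  apply PySem.List.sorted_eq_of_perm_of_pairwise_lt
  · refine List.Perm.trans (List.Perm.cons m ?_) (List.perm_cons_erase hmem).symm
    rw [hfe]
    exact PySem.List.sorted_perm (vs.erase m) (fun s => s) false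
  · rw [List.pairwise_cons]
    constructor
    · intro y hy
      rw [PySem.List.mem_sorted, hfe] at hy
      have hy' : y ∈ vs := List.mem_of_mem_erase hy
      have : m ≠ y := fun h => (hnd.not_mem_erase (h ▸ hy)) 
      exact lt_of_le_of_ne (hmin y hy') this
    · have hnd' : (vs.filter (fun y => !(y == m))).Nodup := List.Nodup.filter _ hnd
      have hpw := PySem.List.sorted_pairwise (vs.filter (fun y => !(y == m))) (fun s => s)
      have hnds : (PySem.List.sorted (vs.filter (fun y => !(y == m))) (fun s => s)).Nodup :=
        (PySem.List.sorted_perm _ _ _).nodup_iff.mpr hnd'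
      exact hpw.imp₂ (fun a b hle hne => lt_of_le_of_ne hle hne) hnds

-- The selection loop of B, on a Nodup set, emits exactly the symbol-major blocks in
-- increasing symbol order.
theorem pv_loopB (n : Int) (vs : List String) (hnd : vs.Nodup) :
    pvLoopB n vs = (PySem.List.sorted vs (fun s => s)).flatMap
        (fun s => (PySem.List.pyRange 1 (n + 1) 1).map (fun nivel => (s, nivel))) := by
  induction hlen : vs.length using Nat.strong_induction_on generalizing vs with
  | _ k ih =>
  rw [pvLoopB.eq_def]
  split
  · -- min? = none: the set was empty
    next hm =>
    have : vs = [] := (PySem.List.min?_eq_none_iff _ _).mp hm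
    subst this
    simp [PySem.List.sorted]
  · next m hm =>
    have hmem : m ∈ vs := PySem.List.min?_mem hm
    have hrem := PySem.Set.remove?_of_mem hmem
    split
    · next hr =>
      rw [hr] at hrem; exact absurd hrem (by simp)
    · next rest hr =>
      have hrest : rest = vs.filter (fun y => !(y == m)) := by
        have := (hrem.symm.trans hr)
        simpa [PySem.Set.discard] using (Option.some_injective _ this).symm
      have hlt : (vs.filter (fun y => !(y == m))).length < vs.length :=
        List.length_filter_lt_length_iff_exists.mpr ⟨m, hmem, by simp⟩
      rw [hrest, ih _ (by omega) _ (List.Nodup.filter _ hnd) rfl,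
        pv_sorted_cons_min vs hnd m hm]
      simp [List.flatMap_cons]

-- ===== VERDICT (by name: the statement is the Claim_ definition above) =====
theorem gerar_alfabeto_da_pilha_spec : Claim_equal_gerar_alfabeto_da_pilha := by
  intro n alfabeto _
  unfold Spec_gerar_alfabeto_da_pilha
  unfold gerar_alfabeto_da_pilha gerar_alfabeto_da_pilha_alt
  have hkeys : ((alfabeto.filter (fun p => p.2 == "variavel")).foldl
      (fun d p => d.insert p.1 p.2) (PySem.Dict.empty : PySem.Dict String String)).keys
      = PySem.Set.ofList ((alfabeto.filter (fun p => p.2 == "variavel")).map (fun p => p.1)) := by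
    rw [PySem.Dict.keys_foldl_insert_key (alfabeto.filter (fun p => p.2 == "variavel"))
      (fun p => p.1) (fun _ p => p.2) PySem.Dict.empty]
    rw [PySem.Dict.keys_empty, PySem.Set.update_nil_left]
  simp only [hkeys]
  rw [pv_loopA _ (PySem.Set.nodup_ofList _) 0 n (PySem.Set.ofList []) (by simp [PySem.Set.ofList])]
  rw [pv_sorted2_eq_sorted_lex]
  have h0 : (PySem.Set.ofList ([] : List (String × Int))) = [] := rfl
  rw [h0, List.nil_append]
  rw [pv_main n _ (PySem.Set.nodup_ofList _) (PySem.List.sorted_ofList_pairwise_lt _)]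
  exact (pv_loopB n _ (PySem.Set.nodup_ofList _)).symm
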